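-- pv_equiv track=rewrite | github.com/bwisniewski44/AOC2021 | 05/05.py | tally_affected_points
-- ===== SOURCE A (Python) =====
-- def tally_affected_points(overlaps_by_coordinate, threshold=1):
--     """
--     TODO EXPLAIN
--
--     :param dict[(int,int), int] overlaps_by_coordinate:
--     :param int threshold:
--
--     :return:
--     :rtype: int
--     """
--
--     points_by_tally = {}    # type: typing.Dict[int, typing.Set[typing.Tuple[int,int]]]
--
--     for coordinate, overlap_tally in overlaps_by_coordinate.items():
--         if overlap_tally in points_by_tally:
--             coordinates = points_by_tally[overlap_tally]
--         else:
--             coordinates = set()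
--             points_by_tally[overlap_tally] = coordinates
--
--         coordinates.add(coordinate)
--
--     qualifying_coordinates_count = 0
--     for overlap_tally, coordinates in points_by_tally.items():
--         if overlap_tally >= threshold:
--             qualifying_coordinates_count += len(coordinates)
--
--     return qualifying_coordinates_count
-- ===== SOURCE B (Python) =====
-- def tally_affected_points(overlaps_by_coordinate, threshold=1):
--     return sum(1 for tally in overlaps_by_coordinate.values() if tally >= threshold)
-- ===== Notes on version B (the rewrite author's own statement) =====
-- stated objective: simpler
-- what changed: Drops A's intermediate tally->set-of-coordinates grouping dict entirely: B counts qualifying coordinates in one direct filtering pass over the tallies (Pre_ only rules out association lists with duplicate coordinate keys, which no Python dict produces).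
import Mathlib
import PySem

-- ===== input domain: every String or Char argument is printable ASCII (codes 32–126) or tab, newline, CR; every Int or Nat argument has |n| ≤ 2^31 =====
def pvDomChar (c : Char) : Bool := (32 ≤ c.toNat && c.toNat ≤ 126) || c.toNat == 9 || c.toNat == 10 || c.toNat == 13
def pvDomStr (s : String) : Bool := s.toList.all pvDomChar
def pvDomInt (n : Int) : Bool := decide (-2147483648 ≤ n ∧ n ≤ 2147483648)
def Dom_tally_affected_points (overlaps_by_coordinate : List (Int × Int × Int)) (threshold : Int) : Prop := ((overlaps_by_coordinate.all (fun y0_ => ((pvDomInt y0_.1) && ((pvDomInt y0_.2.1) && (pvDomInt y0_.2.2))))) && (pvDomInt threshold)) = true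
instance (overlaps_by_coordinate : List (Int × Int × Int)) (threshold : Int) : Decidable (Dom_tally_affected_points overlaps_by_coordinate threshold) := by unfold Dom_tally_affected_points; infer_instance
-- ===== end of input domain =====

-- B replaces A's two-phase "group coordinates by tally, then sum group sizes" with a single
-- direct pass counting tallies ≥ threshold (objective: simpler; equal on dicts, i.e. on
-- association lists without duplicate coordinate keys).


-- ===== PORT A =====
-- A-side helper: the body of A's first for-loop (dict entry (x, y, tally) ~ key (x, y), value tally).
def pvStepA (pbt : PySem.Dict Int (PySem.Set (Int × Int))) (p : Int × Int × Int) :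
    PySem.Dict Int (PySem.Set (Int × Int)) :=
  let coordinate : Int × Int := (p.1, p.2.1)
  let overlap_tally : Int := p.2.2
  let coordinates : PySem.Set (Int × Int) :=
    if pbt.contains overlap_tally then pbt.getD overlap_tally PySem.Set.empty
    else PySem.Set.empty
  pbt.insert overlap_tally (coordinates.add coordinate)

def tally_affected_points (overlaps_by_coordinate : List (Int × Int × Int)) (threshold : Int) : Int :=
  let points_by_tally : PySem.Dict Int (PySem.Set (Int × Int)) :=
    overlaps_by_coordinate.foldl pvStepA PySem.Dict.empty
  points_by_tally.items.foldl
    (fun qualifying_coordinates_count kv =>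
      if kv.1 ≥ threshold then qualifying_coordinates_count + PySem.Set.len kv.2
      else qualifying_coordinates_count) 0

-- ===== PORT B =====
def tally_affected_points_alt (overlaps_by_coordinate : List (Int × Int × Int)) (threshold : Int) : Int :=
  (((overlaps_by_coordinate.map (fun p => p.2.2)).countP (fun tally => threshold ≤ tally) : Nat) : Int)

-- ===== PRECONDITION & SPEC =====
-- Pre_ excludes association lists with duplicate coordinate keys: those do not represent any
-- Python dict (a dict collapses duplicates before A ever runs), so A's set-based dedup result
-- on such a raw list is representation-dependent.
def Pre_tally_affected_points (overlaps_by_coordinate : List (Int × Int × Int)) (threshold : Int) : Prop :=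
  (overlaps_by_coordinate.map (fun p => (p.1, p.2.1))).Nodup
instance (overlaps_by_coordinate : List (Int × Int × Int)) (threshold : Int) : Decidable (Pre_tally_affected_points overlaps_by_coordinate threshold) := by unfold Pre_tally_affected_points; infer_instance
def pvWitness_tally_affected_points : (List (Int × Int × Int)) × Int := ([(0, 1, 2), (3, 4, 1)], 1)

def Spec_tally_affected_points (overlaps_by_coordinate : List (Int × Int × Int)) (threshold : Int) (out : Int) : Prop := out = tally_affected_points_alt overlaps_by_coordinate threshold
instance (overlaps_by_coordinate : List (Int × Int × Int)) (threshold : Int) (out : Int) : Decidable (Spec_tally_affected_points overlaps_by_coordinate threshold out) := by unfold Spec_tally_affected_points; infer_instance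

-- ===== CLAIM (what is proved, stated in full; the proofs are below) =====
def Claim_equal_tally_affected_points : Prop := ∀ (overlaps_by_coordinate : List (Int × Int × Int)) (threshold : Int), Dom_tally_affected_points overlaps_by_coordinate threshold → Pre_tally_affected_points overlaps_by_coordinate threshold → Spec_tally_affected_points overlaps_by_coordinate threshold (tally_affected_points overlaps_by_coordinate threshold)

-- ===== LEMMAS AND PROOFS =====

-- weight of one dict entry in A's second loop
def pvW (t : Int) (kv : Int × PySem.Set (Int × Int)) : Int :=
  if t ≤ kv.1 then PySem.Set.len kv.2 else 0

-- A's second loop as a sum over the items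
def pvS (t : Int) (d : PySem.Dict Int (PySem.Set (Int × Int))) : Int :=
  (d.items.map (pvW t)).sum

lemma pvFoldS (t : Int) (l : List (Int × PySem.Set (Int × Int))) (a : Int) :
    l.foldl (fun acc kv => if kv.1 ≥ t then acc + PySem.Set.len kv.2 else acc) a
      = a + (l.map (pvW t)).sum := by
  have h : (fun (acc : Int) (kv : Int × PySem.Set (Int × Int)) =>
      if kv.1 ≥ t then acc + PySem.Set.len kv.2 else acc)
      = fun acc kv => acc + pvW t kv := by
    funext acc kv
    by_cases hq : t ≤ kv.1 <;> simp [pvW, hq, ge_iff_le]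
  rw [h, PySem.List.foldl_add]

lemma pvMapId (k : Int) (v' : PySem.Set (Int × Int)) (l : List (Int × PySem.Set (Int × Int)))
    (h : k ∉ l.map Prod.fst) :
    l.map (fun q => if q.1 == k then (k, v') else q) = l := by
  induction l with
  | nil => rfl
  | cons q rest ih =>
    simp only [List.map_cons, List.mem_cons, not_or] at h
    have hq : (q.1 == k) = false := beq_eq_false_iff_ne.mpr (fun he => h.1 he.symm)
    simp only [List.map_cons, hq, Bool.false_eq_true, if_false]
    rw [ih h.2]

lemma pvSumReplace (t k : Int) (v' s : PySem.Set (Int × Int))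
    (l : List (Int × PySem.Set (Int × Int)))
    (hn : (l.map Prod.fst).Nodup) (hm : (k, s) ∈ l) :
    ((l.map (fun q => if q.1 == k then (k, v') else q)).map (pvW t)).sum
      = (l.map (pvW t)).sum + pvW t (k, v') - pvW t (k, s) := by
  induction l with
  | nil => simp at hm
  | cons q rest ih =>
    simp only [List.map_cons, List.nodup_cons] at hn
    rcases List.mem_cons.mp hm with hq | hq
    · subst hq
      simp only [List.map_cons, beq_self_eq_true, if_true]
      rw [pvMapId k v' rest hn.1]
      simp only [List.map_cons, List.sum_cons]
      ring
    · have hne : (q.1 == k) = false := by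
        refine beq_eq_false_iff_ne.mpr (fun he => ?_)
        exact hn.1 (he ▸ (List.mem_map.mpr ⟨(k, s), hq, rfl⟩))
      simp only [List.map_cons, hne, Bool.false_eq_true, if_false, List.sum_cons]
      rw [ih hn.2 hq]
      ring

lemma pvStepSum (t : Int) (d : PySem.Dict Int (PySem.Set (Int × Int))) (p : Int × Int × Int)
    (hk : d.keys.Nodup)
    (hf : ∀ kv ∈ d.items, (p.1, p.2.1) ∉ (kv.2 : List (Int × Int))) :
    pvS t (pvStepA d p) = pvS t d + (if t ≤ p.2.2 then 1 else 0) := by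
  by_cases hc : d.contains p.2.2
  · -- existing tally group
    obtain ⟨s, hs⟩ : ∃ s, d.get? p.2.2 = some s := by
      rw [PySem.Dict.contains_eq_isSome_get?] at hc
      exact Option.isSome_iff_exists.mp hc
    have hmem : (p.2.2, s) ∈ d.items :=
      (PySem.Dict.get?_eq_some_iff_mem_items d _ _ hk).mp hs
    have hcs : (p.1, p.2.1) ∉ (s : List (Int × Int)) := hf _ hmem
    have hgd : d.getD p.2.2 PySem.Set.empty = s := PySem.Dict.getD_of_get?_eq_some d PySem.Set.empty hs
    have hadd : s.add (p.1, p.2.1) = s ++ [(p.1, p.2.1)] := by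
      simp only [PySem.Set.add, PySem.Set.contains]
      rw [if_neg]
      simp only [List.contains_iff_mem, beq_iff_eq]
      exact fun h => hcs (by simpa using h)
    simp only [pvStepA, hc, if_true, hgd, pvS]
    rw [PySem.Dict.items_insert_of_contains d _ hc,
        pvSumReplace t p.2.2 (s.add (p.1, p.2.1)) s d.items hk hmem, hadd]
    have hlen : PySem.Set.len ((s ++ [(p.1, p.2.1)]) : PySem.Set (Int × Int))
        = PySem.Set.len s + 1 := by
      simp [PySem.Set.len]
    simp only [pvW, hlen]
    by_cases hq : t ≤ p.2.2 <;> simp [hq] <;> ring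
  · -- fresh tally group
    have hc' : d.contains p.2.2 = false := by simpa using hc
    have hadd : (PySem.Set.empty : PySem.Set (Int × Int)).add (p.1, p.2.1)
        = [(p.1, p.2.1)] := by rfl
    simp only [pvStepA, hc', Bool.false_eq_true, if_false, hadd, pvS]
    rw [PySem.Dict.items_insert_of_not_contains d _ hc']
    simp only [List.map_append, List.sum_append, List.map_cons, List.map_nil, List.sum_cons,
      List.sum_nil, pvW]
    have : PySem.Set.len ([(p.1, p.2.1)] : PySem.Set (Int × Int)) = 1 := by rfl
    rw [this]
    by_cases hq : t ≤ p.2.2 <;> simp [hq]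

lemma pvStepFresh (d : PySem.Dict Int (PySem.Set (Int × Int))) (p : Int × Int × Int)
    (c' : Int × Int) (hne : c' ≠ (p.1, p.2.1))
    (hf : ∀ kv ∈ d.items, c' ∉ (kv.2 : List (Int × Int))) :
    ∀ kv ∈ (pvStepA d p).items, c' ∉ (kv.2 : List (Int × Int)) := by
  intro kv hkv hmem
  simp only [pvStepA] at hkv
  rcases (PySem.Dict.mem_items_insert _ _ _ _).mp hkv with hkv | hkv
  · subst hkv
    rcases (PySem.Set.mem_add _ _ _).mp hmem with h | h
    · by_cases hc : d.contains p.2.2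
      · simp only [hc, if_true] at h
        rcases hg : d.get? p.2.2 with _ | s
        · simp [PySem.Dict.getD_eq_get?_getD, hg, PySem.Set.empty] at h
        · have := hf _ (PySem.Dict.mem_items_of_get?_eq_some _ hg)
          rw [PySem.Dict.getD_of_get?_eq_some d PySem.Set.empty hg] at h
          exact this h
      · simp only [hc, if_false] at h
        simp [PySem.Set.empty] at h
    · exact hne h
  · exact hf _ hkv.1 hmem

lemma pvKeysNodupStep (d : PySem.Dict Int (PySem.Set (Int × Int))) (p : Int × Int × Int)
    (hk : d.keys.Nodup) : (pvStepA d p).keys.Nodup := by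
  simp only [pvStepA]
  exact PySem.Dict.nodup_keys_insert _ _ _ hk

lemma pvLoop (t : Int) (l : List (Int × Int × Int)) (d : PySem.Dict Int (PySem.Set (Int × Int)))
    (hk : d.keys.Nodup)
    (hf : ∀ p ∈ l, ∀ kv ∈ d.items, (p.1, p.2.1) ∉ (kv.2 : List (Int × Int)))
    (hnd : (l.map (fun p => (p.1, p.2.1))).Nodup) :
    pvS t (l.foldl pvStepA d)
      = pvS t d + (((l.map (fun p => p.2.2)).countP (fun tally => t ≤ tally) : Nat) : Int) := by
  induction l generalizing d with
  | nil => simp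
  | cons p rest ih =>
    simp only [List.map_cons, List.nodup_cons] at hnd
    have hfp : ∀ kv ∈ d.items, (p.1, p.2.1) ∉ (kv.2 : List (Int × Int)) :=
      hf p (List.mem_cons_self ..)
    have hrest : ∀ q ∈ rest, ∀ kv ∈ (pvStepA d p).items, (q.1, q.2.1) ∉ (kv.2 : List (Int × Int)) := by
      intro q hq
      refine pvStepFresh d p (q.1, q.2.1) ?_ (hf q (List.mem_cons_of_mem _ hq))
      intro he
      exact hnd.1 (he ▸ (List.mem_map.mpr ⟨q, hq, rfl⟩))
    rw [List.foldl_cons, ih (pvStepA d p) (pvKeysNodupStep d p hk) hrest hnd.2,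
        pvStepSum t d p hk hfp]
    simp only [List.map_cons, List.countP_cons]
    by_cases hq : t ≤ p.2.2 <;> simp [hq] <;> push_cast <;> ring

lemma pvS_empty (t : Int) : pvS t (PySem.Dict.empty : PySem.Dict Int (PySem.Set (Int × Int))) = 0 := by
  rfl

-- ===== VERDICT (by name: the statement is the Claim_ definition above) =====
theorem tally_affected_points_spec : Claim_equal_tally_affected_points := by
  intro obc threshold _hdom hpre
  unfold Spec_tally_affected_points tally_affected_points tally_affected_points_alt
  rw [pvFoldS]
  show 0 + pvS threshold (List.foldl pvStepA PySem.Dict.empty obc) = _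
  rw [pvLoop threshold obc PySem.Dict.empty PySem.Dict.nodup_keys_empty
        (by intro p _ kv hkv; simp [PySem.Dict.empty, PySem.Dict.items] at hkv) hpre,
      pvS_empty]
  ring
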